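-- pv_equiv track=rewrite | github.com/1854039/MSAI_AI6122_Textprocess | create_index.py | merge_times
-- ===== SOURCE A (Python) =====
-- def merge_times(business_times, review_times):
--     merged_times = []
--     business_docs, business_elapsed = zip(*business_times) if business_times else ([], [])
--     review_docs, review_elapsed = zip(*review_times) if review_times else ([], [])
--     all_docs = sorted(set(business_docs).union(review_docs))
--
--     for doc in all_docs:
--         business_time = business_elapsed[business_docs.index(doc)] if doc in business_docs else None
--         review_time = review_elapsed[review_docs.index(doc)] if doc in review_docs else None
--         merged_times.append((doc, business_time, review_time))
--
--     return merged_times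
-- ===== SOURCE B (Python) =====
-- def merge_times(business_times, review_times):
--     def first_sorted(items):
--         first = {}
--         for doc, t in items:
--             first.setdefault(doc, t)
--         return sorted(first.items(), key=lambda p: p[0])
--
--     b = first_sorted(business_times)
--     r = first_sorted(review_times)
--     merged = []
--     i = j = 0
--     while i < len(b) and j < len(r):
--         bdoc, btime = b[i]
--         rdoc, rtime = r[j]
--         if bdoc < rdoc:
--             merged.append((bdoc, btime, None)); i += 1
--         elif rdoc < bdoc:
--             merged.append((rdoc, None, rtime)); j += 1
--         else:
--             merged.append((bdoc, btime, rtime)); i += 1; j += 1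
--     merged.extend((doc, t, None) for doc, t in b[i:])
--     merged.extend((doc, None, t) for doc, t in r[j:])
--     return merged
-- ===== Notes on version B (the rewrite author's own statement) =====
-- stated objective: faster
-- what changed: Replaces A's sorted-union-with-per-doc-linear-scans by building each side's first-occurrence table once, sorting each side separately, and producing the result in a single two-pointer MERGE of the two sorted lists (no per-doc lookup in the output pass).
import Mathlib
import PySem

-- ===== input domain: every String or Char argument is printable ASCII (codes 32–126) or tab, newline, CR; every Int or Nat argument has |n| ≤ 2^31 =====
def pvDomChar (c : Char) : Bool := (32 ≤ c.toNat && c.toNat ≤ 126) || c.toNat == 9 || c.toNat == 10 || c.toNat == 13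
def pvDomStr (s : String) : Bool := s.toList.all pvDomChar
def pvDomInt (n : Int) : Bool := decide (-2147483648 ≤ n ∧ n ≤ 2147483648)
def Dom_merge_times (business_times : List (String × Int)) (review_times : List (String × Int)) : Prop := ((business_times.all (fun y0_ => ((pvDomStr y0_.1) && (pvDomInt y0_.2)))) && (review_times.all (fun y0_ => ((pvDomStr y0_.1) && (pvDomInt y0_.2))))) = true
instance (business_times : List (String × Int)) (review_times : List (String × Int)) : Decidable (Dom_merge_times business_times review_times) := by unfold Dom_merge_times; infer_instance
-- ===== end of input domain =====

-- B builds each side's first-occurrence table once, sorts each side, and emits the result by a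
-- single two-pointer merge of the two sorted lists (objective: faster, no per-doc scans).

-- ===== PORT A =====
-- 'elapsed[docs.index(doc)] if doc in docs else None': index? is none exactly when doc ∉ docs.
def merge_times (business_times : List (String × Int)) (review_times : List (String × Int)) : List (String × Option Int × Option Int) :=
  let business_docs := business_times.map Prod.fst
  let business_elapsed := business_times.map Prod.snd
  let review_docs := review_times.map Prod.fst
  let review_elapsed := review_times.map Prod.snd
  let all_docs := PySem.List.sorted ((PySem.Set.ofList business_docs).union review_docs) (fun x => x)
  all_docs.foldl (fun merged doc =>
    merged ++ [(doc,
      (match PySem.List.index? business_docs doc with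
       | some i => PySem.List.pyGet? business_elapsed (i : Int)
       | none => none),
      (match PySem.List.index? review_docs doc with
       | some i => PySem.List.pyGet? review_elapsed (i : Int)
       | none => none))]) []

-- ===== PORT B =====
-- 'first = {}; for doc, t in items: first.setdefault(doc, t); return sorted(first.items(), key=…)'
def pvFirstSorted (items : List (String × Int)) : List (String × Int) :=
  PySem.List.sorted
    (items.foldl (fun d p => d.setdefault p.1 p.2) PySem.Dict.empty).items
    (fun p => p.1)

-- the two-pointer while loop over the sorted lists, plus the two trailing extends
def pvMerge : List (String × Int) → List (String × Int) → List (String × Option Int × Option Int)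
  | [], r => r.map (fun q => (q.1, none, some q.2))
  | p :: bs, [] => (p :: bs).map (fun p => (p.1, some p.2, none))
  | p :: bs, q :: rs =>
      if p.1 < q.1 then (p.1, some p.2, none) :: pvMerge bs (q :: rs)
      else if q.1 < p.1 then (q.1, none, some q.2) :: pvMerge (p :: bs) rs
      else (p.1, some p.2, some q.2) :: pvMerge bs rs
  termination_by u v => u.length + v.length

def merge_times_alt (business_times : List (String × Int)) (review_times : List (String × Int)) : List (String × Option Int × Option Int) :=
  pvMerge (pvFirstSorted business_times) (pvFirstSorted review_times)

-- ===== PRECONDITION & SPEC =====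
def Spec_merge_times (business_times : List (String × Int)) (review_times : List (String × Int)) (out : List (String × Option Int × Option Int)) : Prop := out = merge_times_alt business_times review_times
instance (business_times : List (String × Int)) (review_times : List (String × Int)) (out : List (String × Option Int × Option Int)) : Decidable (Spec_merge_times business_times review_times out) := by unfold Spec_merge_times; infer_instance

-- ===== CLAIM (what is proved, stated in full; the proofs are below) =====
def Claim_equal_merge_times : Prop := ∀ (business_times : List (String × Int)) (review_times : List (String × Int)), Dom_merge_times business_times review_times → Spec_merge_times business_times review_times (merge_times business_times review_times)

-- ===== LEMMAS AND PROOFS =====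

-- A's lookup of the FIRST time recorded for doc.
def pvALook (xs : List (String × Int)) (doc : String) : Option Int :=
  match PySem.List.index? (xs.map Prod.fst) doc with
  | some i => PySem.List.pyGet? (xs.map Prod.snd) (i : Int)
  | none => none

-- first-match association lookup (proof-side normal form of both programs' lookups)
def pvLook : List (String × Int) → String → Option Int
  | [], _ => none
  | p :: t, d => if p.1 = d then some p.2 else pvLook t d

theorem pv_alook_eq_look (xs : List (String × Int)) (d : String) : pvALook xs d = pvLook xs d := by
  induction xs with
  | nil => simp [pvALook, pvLook, PySem.List.index?]
  | cons p t ih =>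
    by_cases h : p.1 = d
    · subst h
      simp only [pvALook, List.map_cons, PySem.List.index?_cons_self, pvLook]
      simp
    · simp only [pvALook, List.map_cons, pvLook, if_neg h]
      rw [PySem.List.index?_cons_of_ne _ h]
      rw [← ih]
      simp only [pvALook]
      cases hi : PySem.List.index? (t.map Prod.fst) d <;>
        simp [PySem.List.pyGet?_natCast]

theorem pv_look_eq_none_iff (l : List (String × Int)) (d : String) :
    pvLook l d = none ↔ d ∉ l.map Prod.fst := by
  induction l with
  | nil => simp [pvLook]
  | cons p t ih =>
    by_cases h : p.1 = d
    · subst h; simp [pvLook]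
    · simp only [pvLook, if_neg h, ih, List.map_cons, List.mem_cons]
      constructor
      · rintro hn (he | hm)
        · exact h he.symm
        · exact hn hm
      · intro hn hm
        exact hn (Or.inr hm)

theorem pv_look_eq_some_of_mem {l : List (String × Int)} {d : String} {v : Int}
    (hm : (d, v) ∈ l) (hn : (l.map Prod.fst).Nodup) : pvLook l d = some v := by
  induction l with
  | nil => cases hm
  | cons p t ih =>
    simp only [List.map_cons, List.nodup_cons] at hn
    rcases List.mem_cons.mp hm with h | h
    · subst h; simp [pvLook]
    · have hne : p.1 ≠ d := by
        intro he
        exact hn.1 (he ▸ (List.mem_map.mpr ⟨(d, v), h, rfl⟩))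
      simp [pvLook, hne, ih h hn.2]

theorem pv_nodup_fst_of_pairwise {l : List (String × Int)}
    (h : l.Pairwise (fun a b => a.1 < b.1)) : (l.map Prod.fst).Nodup :=
  List.pairwise_map.mpr (h.imp fun hh => ne_of_lt hh)

-- ---- facts about pvFirstSorted ----

theorem pv_keys_foldl_setdefault (xs : List (String × Int)) :
    ∀ (d : PySem.Dict String Int),
      (xs.foldl (fun d p => d.setdefault p.1 p.2) d).keys = PySem.Set.update d.keys (xs.map Prod.fst) := by
  induction xs with
  | nil => intro d; simp [PySem.Set.update_nil]
  | cons p t ih =>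
    intro d
    have hstep : (d.setdefault p.1 p.2).keys = PySem.Set.add d.keys p.1 := by
      rw [PySem.Dict.keys_setdefault, PySem.Set.add_eq_ite, PySem.Dict.contains_eq_decide_mem_keys]
      by_cases h : p.1 ∈ d.keys <;> simp [h]
    simp only [List.foldl_cons, List.map_cons, PySem.Set.update_cons, ih, hstep]

theorem pv_get?_foldl_setdefault (xs : List (String × Int)) :
    ∀ (d : PySem.Dict String Int) (doc : String),
      (xs.foldl (fun d p => d.setdefault p.1 p.2) d).get? doc = (d.get? doc).or (pvLook xs doc) := by
  induction xs with
  | nil => intro d doc; simp [pvLook]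
  | cons p t ih =>
    intro d doc
    simp only [List.foldl_cons, ih]
    by_cases h : p.1 = doc
    · subst h
      rw [PySem.Dict.get?_setdefault_self]
      simp only [pvLook]
      cases hd : d.get? p.1 <;> simp
    · rw [PySem.Dict.get?_setdefault_of_ne d p.2 (fun he => h he.symm)]
      simp [pvLook, h]

def pvFD (xs : List (String × Int)) : PySem.Dict String Int :=
  xs.foldl (fun d p => d.setdefault p.1 p.2) PySem.Dict.empty

theorem pv_keys_fd (xs : List (String × Int)) :
    (pvFD xs).keys = PySem.Set.ofList (xs.map Prod.fst) := by
  rw [pvFD, pv_keys_foldl_setdefault, PySem.Dict.keys_empty, PySem.Set.update_nil_left]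

theorem pv_get?_fd (xs : List (String × Int)) (doc : String) :
    (pvFD xs).get? doc = pvLook xs doc := by
  rw [pvFD, pv_get?_foldl_setdefault]
  simp [PySem.Dict.get?_empty]

theorem pv_fs_map_fst_nodup (xs : List (String × Int)) :
    ((pvFirstSorted xs).map Prod.fst).Nodup := by
  have hperm : (pvFirstSorted xs).Perm (pvFD xs).items := PySem.List.sorted_perm _ _ _
  have hnk : (pvFD xs).keys.Nodup := by
    rw [pv_keys_fd]; exact PySem.Set.nodup_ofList _
  exact ((hperm.map Prod.fst).nodup_iff).mpr hnk

theorem pv_fs_pairwise (xs : List (String × Int)) :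
    (pvFirstSorted xs).Pairwise (fun a b => a.1 < b.1) := by
  have hle : (pvFirstSorted xs).Pairwise (fun a b => a.1 ≤ b.1) :=
    PySem.List.sorted_pairwise _ _
  have hne : (pvFirstSorted xs).Pairwise (fun a b => a.1 ≠ b.1) :=
    List.pairwise_map.mp (pv_fs_map_fst_nodup xs)
  exact (hle.and hne).imp (fun h => lt_of_le_of_ne h.1 h.2)

theorem pv_mem_fs_map_fst (xs : List (String × Int)) (d : String) :
    d ∈ (pvFirstSorted xs).map Prod.fst ↔ d ∈ xs.map Prod.fst := by
  have hperm : (pvFirstSorted xs).Perm (pvFD xs).items := PySem.List.sorted_perm _ _ _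
  rw [(hperm.map Prod.fst).mem_iff]
  show d ∈ (pvFD xs).keys ↔ _
  rw [pv_keys_fd, PySem.Set.mem_ofList]

theorem pv_look_fs (xs : List (String × Int)) (d : String) :
    pvLook (pvFirstSorted xs) d = pvLook xs d := by
  conv_rhs => rw [← pv_get?_fd xs d]
  cases hg : (pvFD xs).get? d with
  | none =>
    rw [pv_look_eq_none_iff, pv_mem_fs_map_fst]
    have := (PySem.Dict.get?_eq_none_iff_not_mem_keys (d := pvFD xs) (k := d)).mp hg
    rw [pv_keys_fd, PySem.Set.mem_ofList] at this
    exact this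
  | some v =>
    have hm : (d, v) ∈ (pvFD xs).items := PySem.Dict.mem_items_of_get?_eq_some _ hg
    have hm' : (d, v) ∈ pvFirstSorted xs := (PySem.List.mem_sorted _ _ _ _).mpr hm
    exact pv_look_eq_some_of_mem hm' (pv_fs_map_fst_nodup xs)

-- ---- facts about pvMerge ----

theorem pv_mem_merge_map_fst (u v : List (String × Int)) (d : String) :
    d ∈ (pvMerge u v).map Prod.fst ↔ d ∈ u.map Prod.fst ∨ d ∈ v.map Prod.fst := by
  induction u, v using pvMerge.induct with
  | case1 r => simp [pvMerge, List.mem_map]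
  | case2 p bs => simp [pvMerge, List.mem_map]
  | case3 p bs q rs h ih => simp [pvMerge, h, ih]; tauto
  | case4 p bs q rs h h2 ih => simp [pvMerge, h, h2, ih]; tauto
  | case5 p bs q rs h h2 ih =>
    have he : p.1 = q.1 := le_antisymm (le_of_not_gt h2) (le_of_not_gt h)
    simp [pvMerge, ih, he]
    tauto

-- every key emitted by the merge of nonempty u = p :: bs (resp. v = q :: rs) bounds below
theorem pv_merge_key_gt {u v : List (String × Int)}
    {c : String} (hcu : ∀ x ∈ u, c < x.1) (hcv : ∀ x ∈ v, c < x.1) :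
    ∀ d ∈ (pvMerge u v).map Prod.fst, c < d := by
  intro d hd
  rcases (pv_mem_merge_map_fst u v d).mp hd with hb | hr
  · rcases List.mem_map.mp hb with ⟨x, hx, rfl⟩
    exact hcu x hx
  · rcases List.mem_map.mp hr with ⟨x, hx, rfl⟩
    exact hcv x hx

theorem pv_merge_pairwise (u v : List (String × Int))
    (hu : u.Pairwise (fun a b => a.1 < b.1)) (hv : v.Pairwise (fun a b => a.1 < b.1)) :
    ((pvMerge u v).map Prod.fst).Pairwise (· < ·) := by
  induction u, v using pvMerge.induct with
  | case1 r =>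
    simp only [pvMerge, List.map_map]
    exact List.Pairwise.map _ (fun _ _ hh => hh) hv
  | case2 p bs =>
    simp only [pvMerge, List.map_map]
    exact List.Pairwise.map _ (fun _ _ hh => hh) hu
  | case3 p bs q rs h ih =>
    rcases List.pairwise_cons.mp hu with ⟨hup, hub⟩
    rcases List.pairwise_cons.mp hv with ⟨hvq, hvr⟩
    simp only [pvMerge, if_pos h, List.map_cons]
    refine List.pairwise_cons.mpr ⟨?_, ih hub hv⟩
    refine pv_merge_key_gt (fun x hx => hup x hx) ?_
    intro x hx
    rcases List.mem_cons.mp hx with rfl | hx'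
    · exact h
    · exact lt_trans h (hvq x hx')
  | case4 p bs q rs h h2 ih =>
    rcases List.pairwise_cons.mp hu with ⟨hup, hub⟩
    rcases List.pairwise_cons.mp hv with ⟨hvq, hvr⟩
    simp only [pvMerge, if_neg h, if_pos h2, List.map_cons]
    refine List.pairwise_cons.mpr ⟨?_, ih hu hvr⟩
    refine pv_merge_key_gt ?_ (fun x hx => hvq x hx)
    intro x hx
    rcases List.mem_cons.mp hx with rfl | hx'
    · exact h2
    · exact lt_trans h2 (hup x hx')
  | case5 p bs q rs h h2 ih =>
    have he : p.1 = q.1 := le_antisymm (le_of_not_gt h2) (le_of_not_gt h)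
    rcases List.pairwise_cons.mp hu with ⟨hup, hub⟩
    rcases List.pairwise_cons.mp hv with ⟨hvq, hvr⟩
    simp only [pvMerge, if_neg h, if_neg h2, List.map_cons]
    refine List.pairwise_cons.mpr ⟨?_, ih hub hvr⟩
    exact pv_merge_key_gt (fun x hx => hup x hx) (fun x hx => he ▸ hvq x hx)

-- every element of the merge is (d, lookup u d, lookup v d)
theorem pv_merge_elem (u v : List (String × Int))
    (hu : u.Pairwise (fun a b => a.1 < b.1)) (hv : v.Pairwise (fun a b => a.1 < b.1)) :
    ∀ x ∈ pvMerge u v, x = (x.1, pvLook u x.1, pvLook v x.1) := by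
  induction u, v using pvMerge.induct with
  | case1 r =>
    intro x hx
    rw [pvMerge] at hx
    rcases List.mem_map.mp hx with ⟨q, hq, rfl⟩
    have h2 : pvLook r q.1 = some q.2 :=
      pv_look_eq_some_of_mem (Prod.mk.eta ▸ hq) (pv_nodup_fst_of_pairwise hv)
    simp [pvLook, h2]
  | case2 p bs =>
    intro x hx
    rw [pvMerge] at hx
    rcases List.mem_map.mp hx with ⟨q, hq, rfl⟩
    have h1 : pvLook (p :: bs) q.1 = some q.2 :=
      pv_look_eq_some_of_mem (Prod.mk.eta ▸ hq) (pv_nodup_fst_of_pairwise hu)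
    show (q.1, some q.2, none) = (q.1, pvLook (p :: bs) q.1, pvLook [] q.1)
    rw [h1]
    rfl
  | case3 p bs q rs h ih =>
    rcases List.pairwise_cons.mp hu with ⟨hup, hub⟩
    rcases List.pairwise_cons.mp hv with ⟨hvq, hvr⟩
    intro x hx
    rw [pvMerge, if_pos h] at hx
    rcases List.mem_cons.mp hx with rfl | hx'
    · have hlr : pvLook (q :: rs) p.1 = none := by
        rw [pv_look_eq_none_iff]
        intro hm
        rcases List.mem_map.mp hm with ⟨y, hy, hfy⟩
        rcases List.mem_cons.mp hy with rfl | hy'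
        · exact absurd hfy.symm (ne_of_lt h)
        · have hlt : p.1 < y.1 := lt_trans h (hvq y hy')
          rw [hfy] at hlt
          exact lt_irrefl _ hlt
      show (p.1, some p.2, none) = (p.1, pvLook (p :: bs) p.1, pvLook (q :: rs) p.1)
      rw [hlr]
      simp [pvLook]
    · have hgt : p.1 < x.1 :=
        pv_merge_key_gt hup
          (fun y hy => by
            rcases List.mem_cons.mp hy with rfl | hy'
            · exact h
            · exact lt_trans h (hvq y hy'))
          x.1 (List.mem_map_of_mem hx')
      have e1 : pvLook (p :: bs) x.1 = pvLook bs x.1 := by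
        simp [pvLook, (ne_of_lt hgt)]
      rw [ih hub hv x hx', e1]
  | case4 p bs q rs h h2 ih =>
    rcases List.pairwise_cons.mp hu with ⟨hup, hub⟩
    rcases List.pairwise_cons.mp hv with ⟨hvq, hvr⟩
    intro x hx
    rw [pvMerge, if_neg h, if_pos h2] at hx
    rcases List.mem_cons.mp hx with rfl | hx'
    · have hlb : pvLook (p :: bs) q.1 = none := by
        rw [pv_look_eq_none_iff]
        intro hm
        rcases List.mem_map.mp hm with ⟨y, hy, hfy⟩
        rcases List.mem_cons.mp hy with rfl | hy'
        · exact absurd hfy.symm (ne_of_lt h2)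
        · have hlt : q.1 < y.1 := lt_trans h2 (hup y hy')
          rw [hfy] at hlt
          exact lt_irrefl _ hlt
      show (q.1, none, some q.2) = (q.1, pvLook (p :: bs) q.1, pvLook (q :: rs) q.1)
      rw [hlb]
      simp [pvLook]
    · have hgt : q.1 < x.1 :=
        pv_merge_key_gt
          (fun y hy => by
            rcases List.mem_cons.mp hy with rfl | hy'
            · exact h2
            · exact lt_trans h2 (hup y hy'))
          hvq x.1 (List.mem_map_of_mem hx')
      have e2 : pvLook (q :: rs) x.1 = pvLook rs x.1 := by
        simp [pvLook, (ne_of_lt hgt)]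
      rw [ih hu hvr x hx', e2]
  | case5 p bs q rs h h2 ih =>
    have he : p.1 = q.1 := le_antisymm (le_of_not_gt h2) (le_of_not_gt h)
    rcases List.pairwise_cons.mp hu with ⟨hup, hub⟩
    rcases List.pairwise_cons.mp hv with ⟨hvq, hvr⟩
    intro x hx
    rw [pvMerge, if_neg h, if_neg h2] at hx
    rcases List.mem_cons.mp hx with rfl | hx'
    · simp [pvLook, he.symm]
    · have hgt : p.1 < x.1 :=
        pv_merge_key_gt hup (fun y hy => he ▸ hvq y hy) x.1 (List.mem_map_of_mem hx')
      have e1 : pvLook (p :: bs) x.1 = pvLook bs x.1 := by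
        simp [pvLook, (ne_of_lt hgt)]
      have e2 : pvLook (q :: rs) x.1 = pvLook rs x.1 := by
        simp [pvLook, (ne_of_lt (he ▸ hgt))]
      rw [ih hub hvr x hx', e1, e2]

theorem pv_merge_eq_map (u v : List (String × Int))
    (hu : u.Pairwise (fun a b => a.1 < b.1)) (hv : v.Pairwise (fun a b => a.1 < b.1)) :
    pvMerge u v = ((pvMerge u v).map Prod.fst).map (fun d => (d, pvLook u d, pvLook v d)) := by
  rw [List.map_map]
  conv_lhs => rw [← List.map_id (pvMerge u v)]
  refine List.map_congr_left ?_
  intro x hx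
  simp only [id, Function.comp]
  exact pv_merge_elem u v hu hv x hx

-- the merge's key list IS A's sorted union
theorem pv_merge_keys_eq (bt rt : List (String × Int)) :
    (pvMerge (pvFirstSorted bt) (pvFirstSorted rt)).map Prod.fst
      = PySem.List.sorted ((PySem.Set.ofList (bt.map Prod.fst)).union (rt.map Prod.fst)) (fun x => x) := by
  have hp : ((pvMerge (pvFirstSorted bt) (pvFirstSorted rt)).map Prod.fst).Pairwise (· < ·) :=
    pv_merge_pairwise _ _ (pv_fs_pairwise bt) (pv_fs_pairwise rt)
  refine (PySem.List.sorted_eq_of_perm_of_pairwise_lt _ _ _ ?_ ?_).symm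
  · rw [List.perm_ext_iff_of_nodup (hp.imp (fun hh => ne_of_lt hh))
      (PySem.Set.nodup_union _ _ (PySem.Set.nodup_ofList _))]
    intro d
    rw [pv_mem_merge_map_fst, pv_mem_fs_map_fst, pv_mem_fs_map_fst,
      PySem.Set.mem_union, PySem.Set.mem_ofList]
  · exact hp

-- ===== VERDICT (by name: the statement is the Claim_ definition above) =====
theorem merge_times_spec : Claim_equal_merge_times := by
  intro bt rt _
  unfold Spec_merge_times merge_times merge_times_alt
  rw [PySem.List.foldl_append_singleton_eq_map, List.nil_append]
  rw [pv_merge_eq_map _ _ (pv_fs_pairwise bt) (pv_fs_pairwise rt), pv_merge_keys_eq]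
  refine List.map_congr_left ?_
  intro d _
  rw [pv_look_fs, pv_look_fs]
  show (d, pvALook bt d, pvALook rt d) = _
  rw [pv_alook_eq_look, pv_alook_eq_look]
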